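-- pv_equiv track=rewrite | github.com/souocare/Cybersecurity_course_cs | Module 1/ex3_2 Diffie-Hellman.py | hack_DH
-- ===== SOURCE A (Python) =====
-- def hack_DH(p, x, mensagemA, mensagemB):
--     publicmessage_User1 = mensagemA
--     publicmessage_User2 = mensagemB
--
--     #Decode public message of User1:
--     privatemessage_user1 = 0
--
--     # Knowing that i is the the private message of user 1 and     1 ≤ i ≤ p−2
--     for i in range(1, p-2): #Loop on the range of the condition above
--         #Using "(x**i) % p" to brute force the private message
--         if (x**i) % p == publicmessage_User1:
--             privatemessage_user1 = i
--             break
--         else: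
--             pass
--
--
--     #Decode public message of User2:
--     privatemessage_user2 = 0
--
--     # Knowing that i is the the private message of user 2 and     1 ≤ i ≤ p−2
--     for i in range(1, p-2): #Loop on the range of the condition above
--         #Using "(x**i) % p" to brute force the private message
--         if (x**i) % p == publicmessage_User2:
--             privatemessage_user2 = i
--             break
--         else:
--             pass
--
--     return privatemessage_user1, privatemessage_user2
-- ===== SOURCE B (Python) =====
-- def hack_DH(p, x, mensagemA, mensagemB):
--     # Single fused pass with an incremental running power mod p:
--     # each step is one multiply-and-reduce instead of recomputing x**i.
--     priv1 = 0
--     priv2 = 0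
--     cur = 1
--     for i in range(1, p - 2):
--         cur = cur * x % p
--         if priv1 == 0 and cur == mensagemA:
--             priv1 = i
--         if priv2 == 0 and cur == mensagemB:
--             priv2 = i
--         if priv1 != 0 and priv2 != 0:
--             break
--     return priv1, priv2
-- ===== Notes on version B (the rewrite author's own statement) =====
-- stated objective: faster
-- what changed: Replaces A's two separate brute-force loops that each recompute the huge power x**i from scratch with one fused pass keeping an incremental running power modulo p (one multiply-and-reduce per step) and searching for both public messages simultaneously.
import Mathlib
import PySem

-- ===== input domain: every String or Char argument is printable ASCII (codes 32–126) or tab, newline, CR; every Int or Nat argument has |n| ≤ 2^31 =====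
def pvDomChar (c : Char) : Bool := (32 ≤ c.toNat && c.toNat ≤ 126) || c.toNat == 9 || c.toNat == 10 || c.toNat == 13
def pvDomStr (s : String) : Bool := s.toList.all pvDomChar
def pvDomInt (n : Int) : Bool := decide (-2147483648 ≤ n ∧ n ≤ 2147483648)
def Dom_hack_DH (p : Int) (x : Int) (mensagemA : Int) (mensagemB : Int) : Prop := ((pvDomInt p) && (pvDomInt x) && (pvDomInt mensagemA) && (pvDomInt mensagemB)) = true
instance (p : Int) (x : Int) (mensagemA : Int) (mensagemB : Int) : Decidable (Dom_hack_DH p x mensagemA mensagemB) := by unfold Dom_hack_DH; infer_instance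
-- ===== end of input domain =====

-- B fuses A's two brute-force loops into one pass with an incremental running power mod p
-- (one multiply-and-reduce per step instead of recomputing x**i); objective: faster.

-- ===== PORT A =====
-- A's 'for i in range(1, p-2): if (x**i) % p == target: priv = i; break' with priv initialised to 0:
-- first matching i of the range, else 0.
def hackLoopA (p : Int) (x : Int) (target : Int) : List Int → Int
  | [] => 0
  | i :: rest =>
    if PySem.Int.mod (x ^ i.toNat) p == target then i
    else hackLoopA p x target rest

def hack_DH (p : Int) (x : Int) (mensagemA : Int) (mensagemB : Int) : List Int :=
  let privatemessage_user1 := hackLoopA p x mensagemA (PySem.List.pyRange 1 (p - 2) 1)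
  let privatemessage_user2 := hackLoopA p x mensagemB (PySem.List.pyRange 1 (p - 2) 1)
  [privatemessage_user1, privatemessage_user2]

-- ===== PORT B =====
-- B's single loop: state (cur, priv1, priv2); break once both found.
def hackLoopB (p : Int) (mA : Int) (mB : Int) (x : Int) :
    List Int → Int → Int → Int → Int × Int
  | [], _, a, b => (a, b)
  | i :: rest, cur, a, b =>
    let cur' := PySem.Int.mod (cur * x) p
    let a' := if a == 0 && cur' == mA then i else a
    let b' := if b == 0 && cur' == mB then i else b
    if a' != 0 && b' != 0 then (a', b')
    else hackLoopB p mA mB x rest cur' a' b'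

def hack_DH_alt (p : Int) (x : Int) (mensagemA : Int) (mensagemB : Int) : List Int :=
  let r := hackLoopB p mensagemA mensagemB x (PySem.List.pyRange 1 (p - 2) 1) 1 0 0
  [r.1, r.2]

-- ===== PRECONDITION & SPEC =====
def Spec_hack_DH (p : Int) (x : Int) (mensagemA : Int) (mensagemB : Int) (out : List Int) : Prop := out = hack_DH_alt p x mensagemA mensagemB
instance (p : Int) (x : Int) (mensagemA : Int) (mensagemB : Int) (out : List Int) : Decidable (Spec_hack_DH p x mensagemA mensagemB out) := by unfold Spec_hack_DH; infer_instance

-- ===== CLAIM (what is proved, stated in full; the proofs are below) =====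
def Claim_equal_hack_DH : Prop := ∀ (p : Int) (x : Int) (mensagemA : Int) (mensagemB : Int), Dom_hack_DH p x mensagemA mensagemB → Spec_hack_DH p x mensagemA mensagemB (hack_DH p x mensagemA mensagemB)

-- ===== LEMMAS AND PROOFS =====

-- p > 0: one multiply-and-reduce advances the running power by one exponent.
theorem mod_mul_step (p x c : Int) (hp : 0 < p) (n : Nat)
    (hc : c = PySem.Int.mod (x ^ n) p) :
    PySem.Int.mod (c * x) p = PySem.Int.mod (x ^ (n + 1)) p := by
  subst hc
  rw [PySem.Int.mod_eq_emod_of_pos hp, PySem.Int.mod_eq_emod_of_pos hp,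
      PySem.Int.mod_eq_emod_of_pos hp, pow_succ]
  conv_rhs => rw [Int.mul_emod]
  rw [Int.mul_emod (x ^ n % p) x p, Int.emod_emod_of_dvd _ dvd_rfl]

-- Core invariant: starting the fused loop at position i (1 ≤ i) with cur = x^(i-1) mod p,
-- each coordinate of the result is the already-found value if nonzero, else A's first match
-- over the remaining range.
theorem hackLoopB_eq (p x mA mB : Int) (hp : 4 ≤ p)
    (n : Nat) (i : Int) (hi : 1 ≤ i) (hn : (p - 2 - i).toNat = n) (a b : Int) :
    hackLoopB p mA mB x (PySem.List.pyRange i (p - 2) 1)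
      (PySem.Int.mod (x ^ (i - 1).toNat) p) a b =
    ((if a ≠ 0 then a else hackLoopA p x mA (PySem.List.pyRange i (p - 2) 1)),
     (if b ≠ 0 then b else hackLoopA p x mB (PySem.List.pyRange i (p - 2) 1))) := by
  induction n generalizing i a b with
  | zero =>
    rw [PySem.List.pyRange_one_eq_nil (by omega)]
    simp only [hackLoopB, hackLoopA, Prod.mk.injEq]
    constructor <;> (split_ifs with h <;> simp_all)
  | succ n ih =>
    have hib : i < p - 2 := by omega
    have hine : i ≠ 0 := by omega
    have hnat : (i - 1).toNat + 1 = i.toNat := by omega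
    have hcur : PySem.Int.mod (PySem.Int.mod (x ^ (i - 1).toNat) p * x) p
        = PySem.Int.mod (x ^ i.toNat) p := by
      rw [mod_mul_step p x _ (by omega) _ rfl, hnat]
    have hstep : ((i + 1) - 1).toNat = i.toNat := by omega
    rw [PySem.List.pyRange_one_cons hib]
    simp only [hackLoopB, hackLoopA, hcur]
    have ihr : ∀ A B : Int,
        hackLoopB p mA mB x (PySem.List.pyRange (i + 1) (p - 2) 1)
          (PySem.Int.mod (x ^ i.toNat) p) A B =
        ((if A ≠ 0 then A else hackLoopA p x mA (PySem.List.pyRange (i + 1) (p - 2) 1)),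
         (if B ≠ 0 then B else hackLoopA p x mB (PySem.List.pyRange (i + 1) (p - 2) 1))) := by
      intro A B
      have h := ih (i + 1) (by omega) (by omega) A B
      rwa [hstep] at h
    by_cases ha : a = 0 <;> by_cases hmA : PySem.Int.mod (x ^ i.toNat) p = mA <;>
      by_cases hb : b = 0 <;> by_cases hmB : PySem.Int.mod (x ^ i.toNat) p = mB <;>
        simp [ha, hmA, hb, hmB, hine, ihr] <;> split_ifs <;> simp_all

theorem hack_DH_spec : Claim_equal_hack_DH := by
  unfold Claim_equal_hack_DH Spec_hack_DH
  intro p x mA mB _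
  unfold hack_DH hack_DH_alt
  by_cases hp : 4 ≤ p
  · have hone : PySem.Int.mod (x ^ ((1 : Int) - 1).toNat) p = 1 := by
      norm_num
      rw [PySem.Int.mod_eq_emod_of_pos (by omega)]
      exact Int.emod_eq_of_lt (by omega) (by omega)
    have h := hackLoopB_eq p x mA mB hp (p - 3).toNat 1 (by omega) (by omega) 0 0
    rw [hone] at h
    rw [h]
    simp
  · rw [PySem.List.pyRange_one_eq_nil (by omega)]
    simp [hackLoopA, hackLoopB]
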